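-- pv_equiv track=rewrite | github.com/Xyfuture/PIMapper | pimapper/matrixmapper/strategy/h2llm_mapping.py | _split_dimension
-- ===== SOURCE A (Python) =====
-- from typing import List, Optional, Tuple
--
-- def _split_dimension(total: int, parts: int) -> List[Tuple[int, int]]:
--     """Split a dimension into parts with balanced sizes.
--
--     Uses ceiling division to handle remainders, similar to the paper's
--     approach for handling non-divisible dimensions.
--
--     Args:
--         total: Total dimension size
--         parts: Number of parts to split into
--
--     Returns:
--         List of (start, end) tuples defining half-open intervals
--     """
--     if parts <= 0:
--         return [(0, total)]
--     if parts > total: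
--         parts = total
--
--     base = total // parts
--     extra = total % parts
--
--     bounds: List[Tuple[int, int]] = []
--     start = 0
--
--     for idx in range(parts):
--         # Give extra elements to the first 'extra' parts
--         length = base + (1 if idx < extra else 0)
--         end = start + length
--         bounds.append((start, end))
--         start = end
--
--     return bounds
-- ===== SOURCE B (Python) =====
-- from typing import List, Tuple
--
-- def _split_dimension(total: int, parts: int) -> List[Tuple[int, int]]:
--     """Split a dimension into parts with balanced sizes (direct, index-based)."""
--     if parts <= 0:
--         return [(0, total)]
--     if parts > total:
--         parts = total
--
--     base = total // parts
--     extra = total % parts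
--
--     # Each interval is a pure function of its index: the first `extra`
--     # parts each absorb one extra element, shifting later starts by min(idx, extra).
--     return [(idx * base + min(idx, extra), (idx + 1) * base + min(idx + 1, extra))
--             for idx in range(parts)]
-- ===== Notes on version B (the rewrite author's own statement) =====
-- stated objective: alternative
-- what changed: The running-start accumulator loop is replaced by a direct comprehension in which each (start, end) interval is computed in closed form from its index as idx*base + min(idx, extra).
import Mathlib
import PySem

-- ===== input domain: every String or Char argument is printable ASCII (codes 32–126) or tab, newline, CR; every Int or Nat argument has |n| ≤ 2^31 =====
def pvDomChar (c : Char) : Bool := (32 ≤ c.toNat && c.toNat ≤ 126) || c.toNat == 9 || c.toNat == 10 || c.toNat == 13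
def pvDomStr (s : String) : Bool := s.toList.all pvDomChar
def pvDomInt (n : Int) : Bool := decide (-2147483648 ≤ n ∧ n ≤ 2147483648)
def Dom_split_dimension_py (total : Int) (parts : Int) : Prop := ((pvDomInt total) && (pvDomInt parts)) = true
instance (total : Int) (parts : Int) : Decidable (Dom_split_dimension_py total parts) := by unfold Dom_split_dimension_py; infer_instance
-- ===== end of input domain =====

-- B replaces the running-start accumulator loop by a closed-form interval per
-- index (idx*base + min(idx, extra)); same cost, different decomposition.

-- ===== PORT A =====
def split_dimension_py (total : Int) (parts : Int) : List (Int × Int) :=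
  if parts ≤ 0 then [(0, total)]
  else
    let parts := if parts > total then total else parts
    let base := PySem.Int.floordiv total parts
    let extra := PySem.Int.mod total parts
    let r := (PySem.List.pyRange 0 parts 1).foldl
      (fun (st : List (Int × Int) × Int) idx =>
        let length := base + (if idx < extra then 1 else 0)
        let e := st.2 + length
        (st.1 ++ [(st.2, e)], e)) ([], 0)
    r.1

-- ===== PORT B =====
def split_dimension_py_alt (total : Int) (parts : Int) : List (Int × Int) :=
  if parts ≤ 0 then [(0, total)]
  else
    let parts := if parts > total then total else parts
    let base := PySem.Int.floordiv total parts
    let extra := PySem.Int.mod total parts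
    (PySem.List.pyRange 0 parts 1).map
      (fun idx => (idx * base + min idx extra, (idx + 1) * base + min (idx + 1) extra))

-- ===== PRECONDITION & SPEC =====
-- Pre_ excludes exactly the inputs where A raises ZeroDivisionError:
-- total = 0 with parts > 0 (parts gets clamped to 0 before the division).
def Pre_split_dimension_py (total : Int) (parts : Int) : Prop := ¬ (total = 0 ∧ 0 < parts)
instance (total : Int) (parts : Int) : Decidable (Pre_split_dimension_py total parts) := by unfold Pre_split_dimension_py; infer_instance
def pvWitness_split_dimension_py : Int × Int := (10, 3)

def Spec_split_dimension_py (total : Int) (parts : Int) (out : List (Int × Int)) : Prop := out = split_dimension_py_alt total parts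
instance (total : Int) (parts : Int) (out : List (Int × Int)) : Decidable (Spec_split_dimension_py total parts out) := by unfold Spec_split_dimension_py; infer_instance

-- ===== CLAIM (what is proved, stated in full; the proofs are below) =====
def Claim_equal_split_dimension_py : Prop := ∀ (total : Int) (parts : Int), Dom_split_dimension_py total parts → Pre_split_dimension_py total parts → Spec_split_dimension_py total parts (split_dimension_py total parts)

-- ===== LEMMAS AND PROOFS =====

-- The running start of A's loop at index a equals a*base + min a extra, so the
-- fold produces exactly B's map (generalized over the range's left end).
theorem pv_loop_eq (base extra : Int) : ∀ (n : Nat) (a : Int) (acc : List (Int × Int)),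
    ((PySem.List.pyRange a (a + n) 1).foldl
      (fun (st : List (Int × Int) × Int) idx =>
        let length := base + (if idx < extra then 1 else 0)
        let e := st.2 + length
        (st.1 ++ [(st.2, e)], e)) (acc, a * base + min a extra)).1
    = acc ++ (PySem.List.pyRange a (a + n) 1).map
        (fun idx => (idx * base + min idx extra, (idx + 1) * base + min (idx + 1) extra)) := by
  intro n
  induction n with
  | zero =>
    intro a acc
    rw [PySem.List.pyRange_one_eq_nil (by omega : a + ((0:Nat):Int) ≤ a)]
    simp
  | succ m ih =>
    intro a acc
    have hlt : a < a + ((m : Int) + 1) := by omega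
    have hcons := PySem.List.pyRange_one_cons hlt
    have hmin : min (a + 1) extra = min a extra + (if a < extra then 1 else 0) := by
      rcases lt_or_ge a extra with h | h
      · rw [min_eq_left (by omega), min_eq_left (by omega), if_pos h]
      · rw [min_eq_right (by omega), min_eq_right h, if_neg (by omega)]; ring
    have hstep : a * base + min a extra + (base + (if a < extra then 1 else 0))
        = (a + 1) * base + min (a + 1) extra := by rw [hmin]; ring
    have h1 : a + ((m : Int) + 1) = (a + 1) + (m : Int) := by ring
    push_cast at hcons ⊢
    rw [hcons, h1]
    simp only [List.foldl_cons, List.map_cons]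
    rw [hstep]
    rw [ih (a + 1) (acc ++ [(a * base + min a extra, (a + 1) * base + min (a + 1) extra)])]
    simp

-- ===== VERDICT (by name: the statement is the Claim_ definition above) =====
theorem split_dimension_py_spec : Claim_equal_split_dimension_py := by
  intro total parts _ _
  unfold Spec_split_dimension_py split_dimension_py split_dimension_py_alt
  by_cases hp : parts ≤ 0
  · simp [hp]
  · simp only [if_neg hp]
    set p := if parts > total then total else parts with hpdef
    set base := PySem.Int.floordiv total p with hbase
    set extra := PySem.Int.mod total p with hextra
    by_cases hple : p ≤ 0
    · rw [PySem.List.pyRange_one_eq_nil (by omega : p ≤ 0)]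
      simp
    · have hppos : 0 < p := by omega
      have hex : 0 ≤ extra := PySem.Int.mod_nonneg total hppos
      have h0 : (0 : Int) = 0 * base + min 0 extra := by
        rw [min_eq_left hex]; ring
      have hkey := pv_loop_eq base extra p.toNat 0 []
      rw [show ((0 : Int) + ((p.toNat : Nat) : Int)) = p from by omega] at hkey
      rw [← h0] at hkey
      simpa using hkey
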